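-- pv_equiv track=rewrite | github.com/NikitaKums/TalTech | iti0102/EX09B/princesses_vol2.py | sort_by_place
-- ===== SOURCE A (Python) =====
-- def sort_by_place(sorted_lines):
--     """
--     Sort given line by place.
--
--     :param sorted_lines: Lines to sort
--     :return: Sorted lines
--     """
--     list1 = []
--     list2 = []
--     list3 = []
--     statusestofilter = ["SAVED", "EATEN", "SLAYED THE DRAGON HERSELF"]
--     if len(sorted_lines) == 0:
--         return sorted_lines
--     for i in range(len(sorted_lines)):
--         if "None" in sorted_lines[i]:
--             raise InvalidPrincessException("Invalid princess!")
--         for words in statusestofilter: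
--             if words in sorted_lines[i]:
--                 raise InvalidPrincessException(f"The princess is already {words}!")
--             continue
--     order = makeorder(sorted_lines)
--     for word in sorted_lines:
--         if order[0] in word:
--             list1.append(word)
--             continue
--         if order[1] in word:
--             list2.append(word)
--             continue
--         if order[2] in word:
--             list3.append(word)
--             continue
--     result = list1 + list2 + list3
--     return result
--
-- def makeorder(sorted_lines):
--     """
--     Make order of places from list as they appear.
--
--     :param sorted_lines: List
--     :return: Order of places
--     """
--     order = []
--     for i in range(len(sorted_lines)):
--         if sorted_lines[i][2] not in order:
--             order.append(sorted_lines[i][2])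
--     return order
--
-- class InvalidPrincessException(Exception):
--     """Raise exception if princess location is wrong."""
--
--     pass
-- ===== SOURCE B (Python) =====
-- class InvalidPrincessException(Exception):
--     """Raise exception if princess location is wrong."""
--
--     pass
--
--
-- def makeorder(sorted_lines):
--     """Make order of places from list as they appear."""
--     order = []
--     for i in range(len(sorted_lines)):
--         if sorted_lines[i][2] not in order:
--             order.append(sorted_lines[i][2])
--     return order
--
--
-- def rank(top, word):
--     """Index of the first of the (at most three) places that occurs in word, else None."""
--     for i, place in enumerate(top):
--         if place in word:
--             return i
--     return None
--
--
-- def sort_by_place(sorted_lines):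
--     """Sort given line by place (stable sort by first-matching place rank)."""
--     if len(sorted_lines) == 0:
--         return sorted_lines
--     for line in sorted_lines:
--         if "None" in line:
--             raise InvalidPrincessException("Invalid princess!")
--         for words in ["SAVED", "EATEN", "SLAYED THE DRAGON HERSELF"]:
--             if words in line:
--                 raise InvalidPrincessException(f"The princess is already {words}!")
--     top = makeorder(sorted_lines)[:3]
--     ranked = []
--     for word in sorted_lines:
--         r = rank(top, word)
--         if r is not None:
--             ranked.append((r, word))
--     ranked.sort(key=lambda t: t[0])
--     return [word for _, word in ranked]
-- ===== Notes on version B (the rewrite author's own statement) =====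
-- stated objective: alternative
-- what changed: Replaces the three explicit bucket accumulators (list1/list2/list3 concatenated) with a rank function giving each line the index of the first of the top-three places it contains, then a single stable sort by that rank over the lines that have one.
import Mathlib
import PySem

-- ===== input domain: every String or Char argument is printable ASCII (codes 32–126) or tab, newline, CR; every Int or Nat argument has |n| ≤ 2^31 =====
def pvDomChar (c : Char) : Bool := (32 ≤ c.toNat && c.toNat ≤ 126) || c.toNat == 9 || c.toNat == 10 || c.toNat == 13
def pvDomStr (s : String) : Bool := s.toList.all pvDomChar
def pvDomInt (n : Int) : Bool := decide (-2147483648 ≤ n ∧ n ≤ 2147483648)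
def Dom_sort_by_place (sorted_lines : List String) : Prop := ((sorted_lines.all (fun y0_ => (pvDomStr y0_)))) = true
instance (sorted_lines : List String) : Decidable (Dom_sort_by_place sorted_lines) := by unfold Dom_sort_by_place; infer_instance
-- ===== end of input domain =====

-- B replaces A's three bucket accumulators by ranking each line with the index of the first
-- top-three place it contains and stably sorting by that rank; same return value on Pre_.

-- ===== PORT A =====
-- statuses whose presence makes the validation loop raise (shared by both Pythons)
def statusesToFilter : List String := ["SAVED", "EATEN", "SLAYED THE DRAGON HERSELF"]

-- a line on which the validation loop raises InvalidPrincessException (identical in A and B)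
def lineInvalid (l : String) : Bool :=
  PySem.Str.isIn "None" l || statusesToFilter.any (fun w => PySem.Str.isIn w l)

-- helper makeorder, identical in A and in B (Source B keeps it as-is)
def makeorder (sorted_lines : List String) : List Char :=
  (PySem.List.pyRange 0 sorted_lines.length 1).foldl
    (fun order i =>
      match PySem.Str.pyGet? (PySem.List.pyGetD sorted_lines i "") 2 with
      | some c => if c ∈ order then order else order ++ [c]
      | none => order)   -- IndexError on a line shorter than 3 chars; excluded by Pre_
    []

def sort_by_place (sorted_lines : List String) : List String :=
  if sorted_lines.length = 0 then sorted_lines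
  else if sorted_lines.any lineInvalid then []   -- raise InvalidPrincessException; excluded by Pre_
  else
    let order := makeorder sorted_lines
    let t := sorted_lines.foldl
      (fun (t : List String × List String × List String) word =>
        match PySem.List.pyGet? order 0 with
        | some p =>
          if PySem.Str.isIn (String.ofList [p]) word then (t.1 ++ [word], t.2.1, t.2.2)
          else match PySem.List.pyGet? order 1 with
            | some p =>
              if PySem.Str.isIn (String.ofList [p]) word then (t.1, t.2.1 ++ [word], t.2.2)
              else match PySem.List.pyGet? order 2 with
                | some p =>
                  if PySem.Str.isIn (String.ofList [p]) word then (t.1, t.2.1, t.2.2 ++ [word])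
                  else t
                | none => t   -- IndexError; unreachable inside Pre_
            | none => t       -- IndexError; unreachable inside Pre_
        | none => t)
      ([], [], [])
    t.1 ++ t.2.1 ++ t.2.2

-- ===== PORT B =====
-- rank(top, word): index of the first place of top occurring in word, else None
def rankWord (top : List Char) (word : String) : Option Nat :=
  match top with
  | [] => none
  | p :: rest =>
    if PySem.Str.isIn (String.ofList [p]) word then some 0
    else (rankWord rest word).map (· + 1)

def sort_by_place_alt (sorted_lines : List String) : List String :=
  if sorted_lines.length = 0 then sorted_lines
  else if sorted_lines.any lineInvalid then []   -- raise InvalidPrincessException; excluded by Pre_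
  else
    let top := (makeorder sorted_lines).take 3
    let ranked := sorted_lines.foldl
      (fun (acc : List (Nat × String)) word =>
        match rankWord top word with
        | some r => acc ++ [(r, word)]
        | none => acc)
      []
    (PySem.List.sorted ranked (fun t => t.1)).map (fun t => t.2)

-- ===== PRECONDITION & SPEC =====
-- Pre_ excludes exactly the inputs on which Python A raises: a line shorter than 3 characters
-- (IndexError in makeorder) or a line containing "None" or one of the three statuses
-- (InvalidPrincessException).
def Pre_sort_by_place (sorted_lines : List String) : Prop :=
  ∀ l ∈ sorted_lines, 3 ≤ l.toList.length ∧ PySem.Str.isIn "None" l = false ∧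
    ∀ w ∈ statusesToFilter, PySem.Str.isIn w l = false
instance (sorted_lines : List String) : Decidable (Pre_sort_by_place sorted_lines) := by
  unfold Pre_sort_by_place; infer_instance

def pvWitness_sort_by_place : List String := ["xx1 Anna", "xx2 Bea", "xx1 Cleo", "xx3 Dana"]

def Spec_sort_by_place (sorted_lines : List String) (out : List String) : Prop :=
  out = sort_by_place_alt sorted_lines
instance (sorted_lines : List String) (out : List String) : Decidable (Spec_sort_by_place sorted_lines out) := by
  unfold Spec_sort_by_place; infer_instance

-- ===== CLAIM (what is proved, stated in full; the proofs are below) =====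
def Claim_equal_sort_by_place : Prop := ∀ (sorted_lines : List String),
  Dom_sort_by_place sorted_lines → Pre_sort_by_place sorted_lines →
  Spec_sort_by_place sorted_lines (sort_by_place sorted_lines)

-- ===== LEMMAS AND PROOFS =====

-- A's branch chain on a word equals dispatch on rankWord of the first three places
theorem stepA_eq_rank (order : List Char) (t : List String × List String × List String)
    (word : String) :
    (match PySem.List.pyGet? order 0 with
     | some p =>
       if PySem.Str.isIn (String.ofList [p]) word then (t.1 ++ [word], t.2.1, t.2.2)
       else match PySem.List.pyGet? order 1 with
         | some p =>
           if PySem.Str.isIn (String.ofList [p]) word then (t.1, t.2.1 ++ [word], t.2.2)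
           else match PySem.List.pyGet? order 2 with
             | some p =>
               if PySem.Str.isIn (String.ofList [p]) word then (t.1, t.2.1, t.2.2 ++ [word])
               else t
             | none => t
         | none => t
     | none => t) =
    (match rankWord (order.take 3) word with
     | some 0 => (t.1 ++ [word], t.2.1, t.2.2)
     | some 1 => (t.1, t.2.1 ++ [word], t.2.2)
     | some 2 => (t.1, t.2.1, t.2.2 ++ [word])
     | _ => t) := by
  match order with
  | [] => simp [rankWord, PySem.List.pyGet?, PySem.List.pyIdx?]
  | [a] =>
    have h0 : PySem.List.pyGet? [a] 0 = some a := PySem.List.pyGet?_zero_cons a []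
    have h1 : PySem.List.pyGet? [a] 1 = none := by
      rw [PySem.List.pyGet?_eq_none_iff]; simp [PySem.Raise.InRange]
    simp only [h0, h1, rankWord, List.take]
    split_ifs <;> rfl
  | [a, b] =>
    have h0 : PySem.List.pyGet? [a, b] 0 = some a := PySem.List.pyGet?_zero_cons a [b]
    have h1 : PySem.List.pyGet? [a, b] 1 = some b := by
      simp
    have h2 : PySem.List.pyGet? [a, b] 2 = none := by
      rw [PySem.List.pyGet?_eq_none_iff]; simp [PySem.Raise.InRange]
    simp only [h0, h1, h2, rankWord, List.take]
    split_ifs <;> rfl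
  | a :: b :: c :: rest =>
    have h0 : PySem.List.pyGet? (a::b::c::rest) 0 = some a :=
      PySem.List.pyGet?_zero_cons a (b::c::rest)
    have h1 : PySem.List.pyGet? (a::b::c::rest) 1 = some b := by
      simpa using PySem.List.pyGet?_ofNat (a::b::c::rest) 1 (by simp)
    have h2 : PySem.List.pyGet? (a::b::c::rest) 2 = some c := by
      simpa using PySem.List.pyGet?_ofNat (a::b::c::rest) 2 (by simp)
    simp only [h0, h1, h2, rankWord, List.take]
    split_ifs <;> rfl

-- rank of the first-three list is < 3
theorem rankWord_lt (top : List Char) (word : String) (r : Nat)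
    (h : rankWord top word = some r) : r < top.length := by
  induction top generalizing r with
  | nil => simp [rankWord] at h
  | cons p rest ih =>
    simp only [rankWord] at h
    split_ifs at h with hp
    · cases h; simp
    · rcases Option.map_eq_some_iff.mp h with ⟨r', hr', rfl⟩
      have := ih r' hr'
      simp; omega

-- A's fold appends the three rank-filtered sublists to the accumulators
theorem foldA_eq (top : List Char) (lines : List String)
    (a b c : List String) :
    lines.foldl
      (fun (t : List String × List String × List String) word =>
        match rankWord top word with
        | some 0 => (t.1 ++ [word], t.2.1, t.2.2)
        | some 1 => (t.1, t.2.1 ++ [word], t.2.2)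
        | some 2 => (t.1, t.2.1, t.2.2 ++ [word])
        | _ => t) (a, b, c) =
    (a ++ lines.filter (fun w => rankWord top w = some 0),
     b ++ lines.filter (fun w => rankWord top w = some 1),
     c ++ lines.filter (fun w => rankWord top w = some 2)) := by
  induction lines generalizing a b c with
  | nil => simp
  | cons w ws ih =>
    rcases hr : rankWord top w with _ | r
    · simp [List.foldl_cons, hr, ih]
    · match r with
      | 0 => simp [List.foldl_cons, hr, ih]
      | 1 => simp [List.foldl_cons, hr, ih]
      | 2 => simp [List.foldl_cons, hr, ih]
      | n + 3 => simp [List.foldl_cons, hr, ih]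

-- B's collecting fold is a filterMap
theorem foldB_eq (top : List Char) (lines : List String) (acc : List (Nat × String)) :
    lines.foldl
      (fun (acc : List (Nat × String)) word =>
        match rankWord top word with
        | some r => acc ++ [(r, word)]
        | none => acc) acc =
    acc ++ lines.filterMap (fun w => (rankWord top w).map (fun r => (r, w))) := by
  induction lines generalizing acc with
  | nil => simp
  | cons w ws ih =>
    rcases hr : rankWord top w with _ | r <;>
      simp [List.foldl_cons, hr, ih]

-- insertBy passes over a block it is not before
theorem insertBy_append_left {α : Type} (before : α → α → Bool) (x : α) (A B : List α)
    (h : ∀ y ∈ A, before x y = false) :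
    PySem.List.insertBy before x (A ++ B) = A ++ PySem.List.insertBy before x B := by
  induction A with
  | nil => simp
  | cons a A ih =>
    have ha : before x a = false := h a (by simp)
    simp only [List.cons_append, PySem.List.insertBy, ha]
    simp only [Bool.false_eq_true, if_false]
    rw [ih (fun y hy => h y (by simp [hy]))]

-- insertBy goes to the front of a block it is before everywhere
theorem insertBy_eq_cons {α : Type} (before : α → α → Bool) (x : α) (B : List α)
    (h : ∀ y ∈ B, before x y = true) :
    PySem.List.insertBy before x B = x :: B := by
  cases B with
  | nil => simp [PySem.List.insertBy]
  | cons b B => simp [PySem.List.insertBy, h b (by simp)]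

-- the stable sort of a list whose keys lie in {0,1,2} is the concatenation of its key-filters
theorem sorted_three (R : List (Nat × String)) (hR : ∀ t ∈ R, t.1 ≤ 2) :
    PySem.List.sorted R (fun t => t.1) =
      R.filter (fun t => t.1 = 0) ++ R.filter (fun t => t.1 = 1) ++
        R.filter (fun t => t.1 = 2) := by
  induction R using List.reverseRecOn with
  | nil => simp [PySem.List.sorted_eq_foldl_insertBy]
  | append_singleton R x ih =>
    have hx : x.1 ≤ 2 := hR x (by simp)
    have hR' : ∀ t ∈ R, t.1 ≤ 2 := fun t ht => hR t (by simp [ht])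
    rw [PySem.List.sorted_eq_foldl_insertBy] at *
    rw [List.foldl_append, List.foldl_cons, List.foldl_nil, ih hR']
    have f0 : ∀ t ∈ R.filter (fun t => t.1 = 0), t.1 = 0 := by
      intro t ht; simpa using (List.mem_filter.mp ht).2
    have f1 : ∀ t ∈ R.filter (fun t => t.1 = 1), t.1 = 1 := by
      intro t ht; simpa using (List.mem_filter.mp ht).2
    have f2 : ∀ t ∈ R.filter (fun t => t.1 = 2), t.1 = 2 := by
      intro t ht; simpa using (List.mem_filter.mp ht).2
    interval_cases h : x.1
    · rw [List.append_assoc,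
        insertBy_append_left _ _ _ _ (fun y hy => by simp [f0 y hy, h]),
        insertBy_eq_cons _ _ _ (fun y hy => by
          rcases List.mem_append.mp hy with hy | hy
          · simp [f1 y hy, h]
          · simp [f2 y hy, h])]
      simp [List.filter_append, h]
    · rw [List.append_assoc,
        insertBy_append_left _ _ _ _ (fun y hy => by simp [f0 y hy, h]),
        insertBy_append_left _ _ _ _ (fun y hy => by simp [f1 y hy, h]),
        insertBy_eq_cons _ _ _ (fun y hy => by simp [f2 y hy, h])]
      simp [List.filter_append, h]
    · rw [List.append_assoc,
        insertBy_append_left _ _ _ _ (fun y hy => by simp [f0 y hy, h]),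
        insertBy_append_left _ _ _ _ (fun y hy => by simp [f1 y hy, h]),
        PySem.List.insertBy_of_forall_not_before _ _ _ (fun y hy => by simp [f2 y hy, h])]
      simp [List.filter_append, h]

-- the key-k filter of the ranked filterMap, projected back to the words
theorem filter_filterMap (top : List Char) (lines : List String) (k : Nat) :
    ((lines.filterMap (fun w => (rankWord top w).map (fun r => (r, w)))).filter
        (fun t => t.1 = k)).map (fun t => t.2) =
      lines.filter (fun w => rankWord top w = some k) := by
  induction lines with
  | nil => simp
  | cons w ws ih =>
    rcases hr : rankWord top w with _ | r
    · simp [hr, ih]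
    · by_cases hk : r = k
      · subst hk
        simp [hr, ih]
      · simp [hr, hk, ih]

-- ===== VERDICT (by name: the statement is the Claim_ definition above) =====
theorem sort_by_place_spec : Claim_equal_sort_by_place := by
  intro lines _ hpre
  unfold Spec_sort_by_place sort_by_place sort_by_place_alt
  by_cases h0 : lines.length = 0
  · simp [h0]
  · have hv : lines.any lineInvalid = false := by
      rw [List.any_eq_false]
      intro l hl
      rcases hpre l hl with ⟨-, hn, hs⟩
      unfold lineInvalid
      rw [Bool.not_eq_true, Bool.or_eq_false_iff, hn]
      refine ⟨rfl, ?_⟩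
      rw [List.any_eq_false]
      intro w hw
      rw [Bool.not_eq_true]
      exact hs w hw
    simp only [h0, if_false, hv, Bool.false_eq_true]
    set order := makeorder lines
    have hstep :
        (fun (t : List String × List String × List String) word =>
          match PySem.List.pyGet? order 0 with
          | some p =>
            if PySem.Str.isIn (String.ofList [p]) word then (t.1 ++ [word], t.2.1, t.2.2)
            else match PySem.List.pyGet? order 1 with
              | some p =>
                if PySem.Str.isIn (String.ofList [p]) word then (t.1, t.2.1 ++ [word], t.2.2)
                else match PySem.List.pyGet? order 2 with
                  | some p =>
                    if PySem.Str.isIn (String.ofList [p]) word then (t.1, t.2.1, t.2.2 ++ [word])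
                    else t
                  | none => t
              | none => t
          | none => t) =
        (fun (t : List String × List String × List String) word =>
          match rankWord (order.take 3) word with
          | some 0 => (t.1 ++ [word], t.2.1, t.2.2)
          | some 1 => (t.1, t.2.1 ++ [word], t.2.2)
          | some 2 => (t.1, t.2.1, t.2.2 ++ [word])
          | _ => t) := by
      funext t word
      exact stepA_eq_rank order t word
    rw [hstep, foldA_eq, foldB_eq]
    simp only [List.nil_append]
    set top := order.take 3
    set R := lines.filterMap (fun w => (rankWord top w).map (fun r => (r, w))) with hRdef
    have hkeys : ∀ t ∈ R, t.1 ≤ 2 := by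
      intro t ht
      rw [hRdef, List.mem_filterMap] at ht
      rcases ht with ⟨w, -, hw⟩
      rcases Option.map_eq_some_iff.mp hw with ⟨r, hr, rfl⟩
      have := rankWord_lt top w r hr
      have htop : top.length ≤ 3 := List.length_take_le 3 order
      simpa using Nat.lt_succ_iff.mp (lt_of_lt_of_le this htop)
    rw [sorted_three R hkeys, hRdef]
    simp only [List.map_append]
    rw [filter_filterMap top lines 0, filter_filterMap top lines 1,
      filter_filterMap top lines 2]
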